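-- pv_equiv track=rewrite | github.com/dwarfmaster/MPSI | ipt/td2/2.3-decoupe.py | decoupe
-- ===== SOURCE A (Python) =====
-- def decoupe(ch):
--     w = ""
--     ret = []
--     for l in ch:
--         if l in {' ', '\n', '\t'}:
--             ret += [w]
--             w = ""
--         else:
--             w += l
--     if len(w) > 0:
--         ret += [w]
--     return ret
-- ===== SOURCE B (Python) =====
-- import re
--
-- def decoupe(ch):
--     parts = re.split(r'[ \t\n]', ch)
--     if parts and parts[-1] == '':
--         parts.pop()
--     return parts
-- ===== Notes on version B (the rewrite author's own statement) =====
-- stated objective: idiomatic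
-- what changed: Replaces A's character-by-character accumulator loop with a single re.split on the delimiter class [ \t\n], then drops at most one trailing empty token (which also maps the empty input [''] to []).
import Mathlib
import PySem

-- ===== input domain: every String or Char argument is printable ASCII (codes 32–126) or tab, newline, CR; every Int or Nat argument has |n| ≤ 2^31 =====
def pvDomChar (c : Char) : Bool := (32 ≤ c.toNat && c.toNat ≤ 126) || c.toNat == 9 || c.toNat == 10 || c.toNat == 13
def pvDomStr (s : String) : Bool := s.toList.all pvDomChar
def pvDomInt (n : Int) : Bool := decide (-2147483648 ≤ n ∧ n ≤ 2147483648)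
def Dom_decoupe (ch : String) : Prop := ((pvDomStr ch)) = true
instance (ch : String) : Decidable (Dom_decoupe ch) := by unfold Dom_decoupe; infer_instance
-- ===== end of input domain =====

-- B replaces A's one-character accumulator loop by a single regex split (re.split on [ \t\n])
-- followed by dropping at most one trailing empty token; ported via List.splitOnP (idiomatic, same cost).

-- ===== PORT A =====
-- A's for-loop as structural recursion over the characters, carrying the current word `w`
-- and the output list `ret`; the base case performs A's final `if len(w) > 0` append.
def decoupeAux (l : List Char) (w : List Char) (ret : List String) : List String :=
  match l with
  | [] => if w.length > 0 then ret ++ [String.ofList w] else ret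
  | c :: cs =>
      if c = ' ' ∨ c = '\n' ∨ c = '\t' then decoupeAux cs [] (ret ++ [String.ofList w])
      else decoupeAux cs (w ++ [c]) ret

def decoupe (ch : String) : List String := decoupeAux ch.toList [] []

-- ===== PORT B =====
def pvDelim (c : Char) : Bool := c = ' ' || c = '\t' || c = '\n'

-- re.split(r'[ \t\n]', ch) = splitOnP on the delimiter class; then pop one trailing empty token.
def decoupe_alt (ch : String) : List String :=
  let parts := (ch.toList.splitOnP pvDelim).map String.ofList
  if parts.getLast? = some "" then parts.dropLast else parts

-- ===== PRECONDITION & SPEC =====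
def Spec_decoupe (ch : String) (out : List String) : Prop := out = decoupe_alt ch
instance (ch : String) (out : List String) : Decidable (Spec_decoupe ch out) := by unfold Spec_decoupe; infer_instance

-- ===== CLAIM (what is proved, stated in full; the proofs are below) =====
def Claim_equal_decoupe : Prop := ∀ (ch : String), Dom_decoupe ch → Spec_decoupe ch (decoupe ch)

-- ===== LEMMAS AND PROOFS =====

-- "drop one trailing empty token, then render the pieces as strings"
def pvFinish (ps : List (List Char)) : List String :=
  if ps.getLast? = some [] then (ps.dropLast).map String.ofList else ps.map String.ofList

theorem pvFinish_cons {ps : List (List Char)} (h : ps ≠ []) (w : List Char) :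
    pvFinish (w :: ps) = String.ofList w :: pvFinish ps := by
  rcases ps with _ | ⟨p, ps'⟩
  · exact absurd rfl h
  · unfold pvFinish
    simp only [List.getLast?_cons_cons, List.dropLast_cons₂]
    split_ifs <;> simp

theorem decoupeAux_eq (l : List Char) : ∀ (w : List Char) (ret : List String),
    decoupeAux l w ret = ret ++ pvFinish ((l.splitOnP pvDelim).modifyHead (w ++ ·)) := by
  induction l with
  | nil =>
      intro w ret
      unfold decoupeAux pvFinish
      simp only [List.splitOnP_nil, List.modifyHead_cons, List.getLast?_singleton]
      rcases w with _ | ⟨c, w'⟩ <;> simp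
  | cons c cs ih =>
      intro w ret
      unfold decoupeAux
      obtain ⟨p, ps, hcs⟩ : ∃ p ps, cs.splitOnP pvDelim = p :: ps := by
        rcases h : cs.splitOnP pvDelim with _ | ⟨p, ps⟩
        · exact absurd h (List.splitOnP_ne_nil _ _)
        · exact ⟨p, ps, rfl⟩
      by_cases hc : c = ' ' ∨ c = '\n' ∨ c = '\t'
      · have hp : pvDelim c = true := by
          unfold pvDelim; rcases hc with h | h | h <;> simp [h]
        rw [if_pos hc, ih, List.splitOnP_cons, hp]
        simp only [if_true, hcs, List.modifyHead_cons, List.nil_append,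
          pvFinish_cons (List.cons_ne_nil p ps), List.append_assoc, List.singleton_append,
          List.append_nil]
      · have hp : pvDelim c = false := by
          unfold pvDelim
          simp only [Bool.or_eq_false_iff, decide_eq_false_iff_not]
          exact ⟨⟨fun h => hc (Or.inl h), fun h => hc (Or.inr (Or.inr h))⟩,
                 fun h => hc (Or.inr (Or.inl h))⟩
        rw [if_neg hc, ih, List.splitOnP_cons, hp]
        simp [hcs, List.modifyHead_cons, List.append_assoc]

theorem getLast?_map_ofList (ps : List (List Char)) :
    (ps.map String.ofList).getLast? = some "" ↔ ps.getLast? = some [] := by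
  rw [List.getLast?_map]
  rcases h : ps.getLast? with _ | l <;> simp [String.ofList_eq_empty_iff]

-- ===== VERDICT (by name: the statement is the Claim_ definition above) =====
theorem decoupe_spec : Claim_equal_decoupe := by
  intro ch _
  unfold Spec_decoupe decoupe decoupe_alt
  rw [decoupeAux_eq]
  have hid : ∀ (l : List (List Char)), l.modifyHead (fun x => [] ++ x) = l := by
    intro l; cases l <;> simp
  rw [List.nil_append, hid]
  unfold pvFinish
  by_cases h : (ch.toList.splitOnP pvDelim).getLast? = some []
  · rw [if_pos h, if_pos ((getLast?_map_ofList _).mpr h), List.map_dropLast]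
  · rw [if_neg h, if_neg (fun hx => h ((getLast?_map_ofList _).mp hx))]
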